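-- pv_equiv track=rewrite | github.com/vuorenkoski/AQC | performance_measurement/graphs.py | graph_tree
-- ===== SOURCE A (Python) =====
-- def graph_tree(vertices):
--     # balanced binary tree
--     E = []
--     if vertices<2:
--         return E
--     j = 1
--     k = 0
--     for i in range(vertices):
--         if j+i*2<vertices:
--             E.append((i,j+i*2))
--         if j+i*2+1<vertices:
--             E.append((i,j+i*2+1))
--         k += 1
--         if k==j:
--             k = 0
--             j *= j
--     return E
-- ===== SOURCE B (Python) =====
-- def graph_tree(vertices):
--     # balanced binary tree: each non-root vertex v is joined to its parent (v-1)//2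
--     return [((v - 1) // 2, v) for v in range(1, vertices)]
-- ===== Notes on version B (the rewrite author's own statement) =====
-- stated objective: simpler
-- what changed: Instead of iterating over parents with two child-index bound checks and j/k bookkeeping state, B iterates once over each non-root vertex and emits the single edge joining it to its parent, computed by floor-halving the predecessor index.
import Mathlib
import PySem

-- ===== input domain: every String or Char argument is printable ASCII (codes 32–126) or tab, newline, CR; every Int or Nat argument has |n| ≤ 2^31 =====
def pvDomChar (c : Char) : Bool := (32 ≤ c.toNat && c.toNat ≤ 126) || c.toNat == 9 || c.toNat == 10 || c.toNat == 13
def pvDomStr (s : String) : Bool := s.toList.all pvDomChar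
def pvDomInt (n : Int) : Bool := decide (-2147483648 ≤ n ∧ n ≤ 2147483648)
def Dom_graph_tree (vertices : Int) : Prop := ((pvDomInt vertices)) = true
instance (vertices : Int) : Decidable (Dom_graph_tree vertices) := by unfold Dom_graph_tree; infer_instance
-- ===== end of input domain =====

-- B replaces A's parent loop (two child appends with bound checks and j/k bookkeeping)
-- by a single comprehension over the non-root vertices v emitting ((v-1)//2, v): simpler.

-- ===== PORT A =====
def graph_tree (vertices : Int) : List (Int × Int) :=
  let E : List (Int × Int) := []
  if vertices < 2 then E
  else
    let s :=
      (PySem.List.pyRange 0 vertices 1).foldl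
        (fun (st : List (Int × Int) × Int × Int) i =>
          let E := st.1
          let j := st.2.1
          let k := st.2.2
          let E := if j + i * 2 < vertices then E ++ [(i, j + i * 2)] else E
          let E := if j + i * 2 + 1 < vertices then E ++ [(i, j + i * 2 + 1)] else E
          let k := k + 1
          if k == j then (E, j * j, 0) else (E, j, k))
        (E, 1, 0)
    s.1

-- ===== PORT B =====
def graph_tree_alt (vertices : Int) : List (Int × Int) :=
  (PySem.List.pyRange 1 vertices 1).map (fun v => (PySem.Int.floordiv (v - 1) 2, v))

-- ===== PRECONDITION & SPEC =====
def Spec_graph_tree (vertices : Int) (out : List (Int × Int)) : Prop := out = graph_tree_alt vertices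
instance (vertices : Int) (out : List (Int × Int)) : Decidable (Spec_graph_tree vertices out) := by unfold Spec_graph_tree; infer_instance

-- ===== CLAIM (what is proved, stated in full; the proofs are below) =====
def Claim_equal_graph_tree : Prop := ∀ (vertices : Int), Dom_graph_tree vertices → Spec_graph_tree vertices (graph_tree vertices)

-- ===== LEMMAS AND PROOFS =====

-- A's loop from parent index a onward, starting with accumulator acc and state (j,k)=(1,0),
-- produces exactly the edges to children 2a+1 .. n-1 in order.
theorem loopA_eq (n : Int) (a : Int) (ha : 0 ≤ a) (acc : List (Int × Int)) :
    (PySem.List.pyRange a n 1).foldl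
        (fun (st : List (Int × Int) × Int × Int) i =>
          let E := st.1
          let j := st.2.1
          let k := st.2.2
          let E := if j + i * 2 < n then E ++ [(i, j + i * 2)] else E
          let E := if j + i * 2 + 1 < n then E ++ [(i, j + i * 2 + 1)] else E
          let k := k + 1
          if k == j then (E, j * j, 0) else (E, j, k))
        (acc, 1, 0)
      = (acc ++ (PySem.List.pyRange (2 * a + 1) n 1).map
            (fun v => (PySem.Int.floordiv (v - 1) 2, v)), 1, 0) := by
  by_cases h : a < n
  · have ha' : 0 ≤ a + 1 := by omega
    have hstep :
        (let E := (acc, (1:Int), (0:Int)).1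
         let j := (acc, (1:Int), (0:Int)).2.1
         let k := (acc, (1:Int), (0:Int)).2.2
         let E := if j + a * 2 < n then E ++ [(a, j + a * 2)] else E
         let E := if j + a * 2 + 1 < n then E ++ [(a, j + a * 2 + 1)] else E
         let k := k + 1
         if k == j then (E, j * j, 0) else (E, j, k))
        = (acc ++ (if 1 + a * 2 < n then [(a, 1 + a * 2)] else [])
              ++ (if 1 + a * 2 + 1 < n then [(a, 1 + a * 2 + 1)] else []), 1, 0) := by
      simp only []
      split_ifs <;> simp_all
    rw [PySem.List.pyRange_one_cons h, List.foldl_cons, hstep, loopA_eq n (a + 1) ha']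
    congr 1
    rw [List.append_assoc, List.append_assoc]
    congr 1
    -- remains: guards ++ map g (pyRange (2(a+1)+1) n 1) = map g (pyRange (2a+1) n 1)
    by_cases h2 : 1 + a * 2 + 1 < n
    · have h1 : 1 + a * 2 < n := by omega
      rw [if_pos h1, if_pos h2,
        PySem.List.pyRange_one_cons (show 2 * a + 1 < n by omega),
        PySem.List.pyRange_one_cons (show 2 * a + 1 + 1 < n by omega)]
      rw [show 2 * a + 1 + 1 + 1 = 2 * (a + 1) + 1 by ring]
      simp [show (1 : Int) + a * 2 = 2 * a + 1 by ring]
      omega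
    · rw [if_neg h2,
        PySem.List.pyRange_one_eq_nil (a := 2 * (a + 1) + 1) (b := n) (by omega)]
      by_cases h1 : 1 + a * 2 < n
      · rw [if_pos h1, PySem.List.pyRange_one_cons (show 2 * a + 1 < n by omega),
          PySem.List.pyRange_one_eq_nil (a := 2 * a + 1 + 1) (b := n) (by omega)]
        simp [show (1 : Int) + a * 2 = 2 * a + 1 by ring]
      · rw [if_neg h1, PySem.List.pyRange_one_eq_nil (a := 2 * a + 1) (b := n) (by omega)]
        simp
  · rw [PySem.List.pyRange_one_eq_nil (by omega),
      PySem.List.pyRange_one_eq_nil (a := 2 * a + 1) (b := n) (by omega)]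
    simp
termination_by (n - a).toNat
decreasing_by omega

-- ===== VERDICT (by name: the statement is the Claim_ definition above) =====
theorem graph_tree_spec : Claim_equal_graph_tree := by
  intro vertices _
  unfold Spec_graph_tree graph_tree graph_tree_alt
  by_cases h : vertices < 2
  · rw [if_pos h, PySem.List.pyRange_one_eq_nil (by omega)]
    simp
  · rw [if_neg h]
    simp only [loopA_eq vertices 0 le_rfl []]
    norm_num
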